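-- pv_equiv track=rewrite | github.com/GamboaHMA/Scrapper_Distribuido | dns_server/dns_server.py | comparar_lista_ips
-- ===== SOURCE A (Python) =====
-- def comparar_lista_ips(ips:list):
--     '''M칠todo que devuelve la mayor de las IPs en una lista'''
--     if not ips:
--         return None
--
--     # Inicializamos con la primera IP como la mayor
--     mayor_ip = ips[0]
--     partes_mayor = mayor_ip.split('.')
--
--     # Comparamos con cada una de las otras IPs
--     for ip in ips[1:]:
--         partes_actual = ip.split('.')
--
--         for p_mayor, p_actual in zip(partes_mayor, partes_actual):
--             num_mayor = int(p_mayor)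
--             num_actual = int(p_actual)
--
--             if num_actual > num_mayor:
--                 # La IP actual es mayor
--                 mayor_ip = ip
--                 partes_mayor = partes_actual
--                 break
--             elif num_actual < num_mayor:
--                 # La IP actual es menor
--                 break
--             # Si son iguales, continuamos con la siguiente parte
--
--     return mayor_ip
-- ===== SOURCE B (Python) =====
-- def comparar_lista_ips(ips: list):
--     '''Metodo que devuelve la mayor de las IPs en una lista (torneo divide y venceras)'''
--     if not ips:
--         return None
--
--     def clave(ip):
--         return [int(p) for p in ip.split('.')]
--
--     def torneo(xs):
--         # xs is never empty
--         if len(xs) == 1: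
--             return xs[0]
--         mid = len(xs) // 2
--         izq = torneo(xs[:mid])
--         der = torneo(xs[mid:])
--         return der if clave(izq) < clave(der) else izq
--
--     return torneo(ips)
-- ===== Notes on version B (the rewrite author's own statement) =====
-- stated objective: alternative
-- what changed: Replaces A's left-to-right scan with a hand-rolled octet-by-octet early-break comparison by a divide-and-conquer tournament: recursively compute the best IP of each half of the list and combine the two winners with one whole-key comparison (list of octet ints), keeping the left winner on ties.
-- outside the precondition, e.g. on comparar_lista_ips(['3.2', '5.x']): A returns '5.x', B raises ValueError; on comparar_lista_ips(['1.2', '1.2.3']): A returns '1.2', B returns '1.2.3'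
import Mathlib
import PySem

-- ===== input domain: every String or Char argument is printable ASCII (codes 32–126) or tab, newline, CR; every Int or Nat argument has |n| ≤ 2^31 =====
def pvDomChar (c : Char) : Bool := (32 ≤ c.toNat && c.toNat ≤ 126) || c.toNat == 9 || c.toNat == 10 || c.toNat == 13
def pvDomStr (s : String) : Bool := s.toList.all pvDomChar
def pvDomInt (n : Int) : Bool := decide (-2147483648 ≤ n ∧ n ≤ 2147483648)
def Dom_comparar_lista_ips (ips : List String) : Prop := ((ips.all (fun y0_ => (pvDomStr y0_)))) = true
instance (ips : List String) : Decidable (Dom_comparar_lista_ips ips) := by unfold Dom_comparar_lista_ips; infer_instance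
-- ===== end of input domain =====

-- B replaces A's left-to-right scan with hand-rolled octet-by-octet early-break comparison
-- by a divide-and-conquer tournament (best of each half, combined by one whole-key
-- comparison, left winner kept on ties). Alternative decomposition, similar cost.
-- Return value only; neither program mutates its argument.

-- ===== PORT A =====

-- ip.split('.')  (separator nonempty, so split? always returns some)
def pvParts (s : String) : List String := (PySem.Str.split? s ".").getD []

-- A's inner 'for p_mayor, p_actual in zip(...)' loop:
-- some true = 'actual is greater' (break with switch), some false = fell through or broke
-- with 'actual is smaller', none = int() raised ValueError (excluded by Pre_).
def pvCmpLoop : List String → List String → Option Bool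
  | m :: ms, a :: as =>
    match PySem.Int.ofStr? m, PySem.Int.ofStr? a with
    | some nm, some na =>
      if na > nm then some true
      else if na < nm then some false
      else pvCmpLoop ms as
    | _, _ => none
  | _, _ => some false

-- A's outer loop body; state = (mayor_ip, partes_mayor); none = a ValueError occurred.
def pvStepA (st : Option (String × List String)) (ip : String) : Option (String × List String) :=
  match st with
  | none => none
  | some (mayor, pm) =>
    let pa := pvParts ip
    match pvCmpLoop pm pa with
    | some true => some (ip, pa)
    | some false => some (mayor, pm)
    | none => none

def comparar_lista_ips (ips : List String) : Option String :=
  match ips with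
  | [] => none
  | first :: rest =>
    match rest.foldl pvStepA (some (first, pvParts first)) with
    | some (mayor, _) => some mayor
    | none => none

-- ===== PORT B =====

-- clave(ip) = [int(p) for p in ip.split('.')]; the '.getD 0' placeholder is only reached
-- where int(p) raises ValueError, which Pre_ excludes.
def pvKey (ip : String) : List Int :=
  (pvParts ip).map (fun p => (PySem.Int.ofStr? p).getD 0)

-- torneo(xs): tournament over a nonempty list; Python never calls it on [], so the
-- 'length ≤ 1' branch returning headD "" covers exactly Python's 'len(xs) == 1' case.
def pvTorneo (xs : List String) : String :=
  if h : xs.length ≤ 1 then xs.headD ""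
  else
    let mid := xs.length / 2
    let izq := pvTorneo (xs.take mid)
    let der := pvTorneo (xs.drop mid)
    if pvKey izq < pvKey der then der else izq
termination_by xs.length
decreasing_by
  · simp only [List.length_take]; omega
  · simp only [List.length_drop]; omega

def comparar_lista_ips_alt (ips : List String) : Option String :=
  match ips with
  | [] => none
  | _ :: _ => some (pvTorneo ips)

-- ===== PRECONDITION & SPEC =====
-- On lists of two or more IPs, Pre_ excludes (a) lists containing an octet that int() cannot
-- parse — there A may either raise ValueError or, when an earlier octet already decides a
-- comparison, return without ever parsing it, while B always parses both winners' octets and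
-- raises; and (b) ragged lists whose IPs split into different numbers of parts, where A's zip
-- truncates the comparison (an accident of malformed input as defensible as B's full list
-- comparison). Lists of fewer than two IPs always satisfy Pre_.
def Pre_comparar_lista_ips (ips : List String) : Prop :=
  ips.length ≤ 1 ∨
  ((∀ ip ∈ ips, ∀ p ∈ pvParts ip, PySem.Int.ofStr? p ≠ none) ∧
   (∀ ip1 ∈ ips, ∀ ip2 ∈ ips, (pvParts ip1).length = (pvParts ip2).length))
instance (ips : List String) : Decidable (Pre_comparar_lista_ips ips) := by
  unfold Pre_comparar_lista_ips; infer_instance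

def pvWitness_comparar_lista_ips : List String := ["10.2.0.3", "10.2.1.0", "9.200.1.1"]

def Spec_comparar_lista_ips (ips : List String) (out : Option String) : Prop := out = comparar_lista_ips_alt ips
instance (ips : List String) (out : Option String) : Decidable (Spec_comparar_lista_ips ips out) := by unfold Spec_comparar_lista_ips; infer_instance

-- ===== CLAIM (what is proved, stated in full; the proofs are below) =====
def Claim_equal_comparar_lista_ips : Prop := ∀ (ips : List String), Dom_comparar_lista_ips ips → Pre_comparar_lista_ips ips → Spec_comparar_lista_ips ips (comparar_lista_ips ips)

-- ===== LEMMAS AND PROOFS =====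

-- Proof-side reference: the running-max step of a left fold (used to characterise BOTH ports).
def pvStepB (st : Option String) (ip : String) : Option String :=
  match st with
  | none => some ip
  | some m => if pvKey m < pvKey ip then some ip else some m

-- Left-biased binary max on keys: the tournament's combining operation.
def pvJoin (a b : String) : String := if pvKey a < pvKey b then b else a

theorem pvJoin_assoc (a b c : String) : pvJoin (pvJoin a b) c = pvJoin a (pvJoin b c) := by
  unfold pvJoin
  by_cases h1 : pvKey a < pvKey b
  · by_cases h2 : pvKey b < pvKey c
    · simp [h1, h2, lt_trans h1 h2]
    · simp [h1, h2]
  · by_cases h2 : pvKey b < pvKey c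
    · by_cases h3 : pvKey a < pvKey c
      · simp [h1, h2, h3]
      · simp [h1, h2, h3]
    · have h3 : ¬ pvKey a < pvKey c := fun h => absurd (lt_of_lt_of_le h (not_lt.mp h2)) h1
      simp [h1, h2, h3]

theorem foldl_stepB_some (l : List String) :
    ∀ m : String, l.foldl pvStepB (some m) =
      some (match l.foldl pvStepB none with | none => m | some r => pvJoin m r) := by
  induction l with
  | nil => intro m; rfl
  | cons x l ih =>
    intro m
    have hstep : pvStepB (some m) x = some (pvJoin m x) := by
      simp only [pvStepB, pvJoin]; split_ifs <;> rfl
    have hnone : (x :: l).foldl pvStepB none = l.foldl pvStepB (some x) := rfl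
    rw [List.foldl_cons, hstep, ih (pvJoin m x), hnone, ih x]
    cases hl : l.foldl pvStepB none with
    | none => simp
    | some r => simp [pvJoin_assoc]

theorem torneo_fold (xs : List String) (hne : xs ≠ []) :
    xs.foldl pvStepB none = some (pvTorneo xs) := by
  induction hn : xs.length using Nat.strong_induction_on generalizing xs with
  | _ n ih =>
  rw [pvTorneo]
  by_cases hle : xs.length ≤ 1
  · match xs, hne with
    | [x], _ => rfl
    | x :: y :: l, _ => simp at hle
  · rw [dif_neg hle]
    have h2 : 2 ≤ xs.length := by omega
    have hmid1 : 1 ≤ xs.length / 2 := by omega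
    have hmidlt : xs.length / 2 < xs.length := by omega
    have htlen : (xs.take (xs.length / 2)).length = xs.length / 2 := by
      simp [List.length_take]; omega
    have hdlen : (xs.drop (xs.length / 2)).length = xs.length - xs.length / 2 := by
      simp [List.length_drop]
    have htne : xs.take (xs.length / 2) ≠ [] := by
      intro h; rw [h] at htlen; simp at htlen; omega
    have hdne : xs.drop (xs.length / 2) ≠ [] := by
      intro h; rw [h] at hdlen; simp at hdlen; omega
    have ht := ih (xs.take (xs.length / 2)).length (by omega) _ htne rfl
    have hd := ih (xs.drop (xs.length / 2)).length (by omega) _ hdne rfl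
    conv_lhs => rw [← List.take_append_drop (xs.length / 2) xs]
    rw [List.foldl_append, ht, foldl_stepB_some, hd]
    simp [pvJoin]

-- The inner zip loop decides exactly the lexicographic comparison of the numeric keys,
-- provided every part parses and the two part lists have the same length.
theorem pvCmpLoop_eq_lt (ms : List String) :
    ∀ as : List String, (∀ p ∈ ms, PySem.Int.ofStr? p ≠ none) →
    (∀ p ∈ as, PySem.Int.ofStr? p ≠ none) → ms.length = as.length →
    pvCmpLoop ms as =
      some (decide ((ms.map (fun p => (PySem.Int.ofStr? p).getD 0)) <
                    (as.map (fun p => (PySem.Int.ofStr? p).getD 0)))) := by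
  induction ms with
  | nil =>
    intro as _ _ hlen
    cases as with
    | nil => simp [pvCmpLoop]
    | cons a as' => simp at hlen
  | cons m ms' ih =>
    intro as hm ha hlen
    cases as with
    | nil => simp at hlen
    | cons a as' =>
      have hmn : PySem.Int.ofStr? m ≠ none := hm m (List.mem_cons_self ..)
      have han : PySem.Int.ofStr? a ≠ none := ha a (List.mem_cons_self ..)
      obtain ⟨nm, hnm⟩ := Option.ne_none_iff_exists'.mp hmn
      obtain ⟨na, hna⟩ := Option.ne_none_iff_exists'.mp han
      have hrec := ih as' (fun p hp => hm p (List.mem_cons_of_mem _ hp))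
        (fun p hp => ha p (List.mem_cons_of_mem _ hp)) (by simpa using hlen)
      simp only [pvCmpLoop, hnm, hna, List.map_cons, Option.getD_some]
      by_cases h1 : na > nm
      · have hlt : (nm :: ms'.map (fun p => (PySem.Int.ofStr? p).getD 0)) <
            (na :: as'.map (fun p => (PySem.Int.ofStr? p).getD 0)) :=
          List.cons_lt_cons_iff.mpr (Or.inl h1)
        simp [h1, hlt]
      · by_cases h2 : na < nm
        · have hnlt : ¬ (nm :: ms'.map (fun p => (PySem.Int.ofStr? p).getD 0)) <
              (na :: as'.map (fun p => (PySem.Int.ofStr? p).getD 0)) := by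
            rw [List.cons_lt_cons_iff]; omega
          simp [h1, h2, hnlt]
        · have heq : nm = na := by omega
          simp [hrec, heq]

-- Invariant of A's outer loop: the fold over the tail, carrying (mayor, its parts),
-- follows the running-max fold pvStepB exactly.
theorem pvFold_inv (rest : List String) :
    ∀ mayor : String,
    (∀ p ∈ pvParts mayor, PySem.Int.ofStr? p ≠ none) →
    (∀ ip ∈ rest, (∀ p ∈ pvParts ip, PySem.Int.ofStr? p ≠ none) ∧
                  (pvParts ip).length = (pvParts mayor).length) →
    rest.foldl pvStepA (some (mayor, pvParts mayor)) =
      Option.map (fun m => (m, pvParts m)) (rest.foldl pvStepB (some mayor)) := by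
  induction rest with
  | nil => intro mayor _ _; rfl
  | cons ip rest' ih =>
    intro mayor hmp hrest
    obtain ⟨hip_parse, hip_len⟩ := hrest ip (List.mem_cons_self ..)
    have hcmp := pvCmpLoop_eq_lt (pvParts mayor) (pvParts ip) hmp hip_parse hip_len.symm
    simp only [List.foldl_cons]
    have hstepA : pvStepA (some (mayor, pvParts mayor)) ip =
        some (if pvKey mayor < pvKey ip then (ip, pvParts ip) else (mayor, pvParts mayor)) := by
      simp only [pvStepA, hcmp, pvKey]
      by_cases h : (pvParts mayor).map (fun p => (PySem.Int.ofStr? p).getD 0) <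
                   (pvParts ip).map (fun p => (PySem.Int.ofStr? p).getD 0)
      · simp [h]
      · simp [h]
    have hstepB : pvStepB (some mayor) ip =
        some (if pvKey mayor < pvKey ip then ip else mayor) := by
      simp only [pvStepB]; split_ifs <;> rfl
    rw [hstepA, hstepB]
    by_cases h : pvKey mayor < pvKey ip
    · simp only [h, if_pos]
      exact ih ip hip_parse (fun j hj => by
        obtain ⟨hp, hl⟩ := hrest j (List.mem_cons_of_mem _ hj)
        exact ⟨hp, hl.trans hip_len.symm⟩)
    · simp only [h, if_false]
      exact ih mayor hmp (fun j hj => hrest j (List.mem_cons_of_mem _ hj))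

-- ===== VERDICT (by name: the statement is the Claim_ definition above) =====
theorem comparar_lista_ips_spec : Claim_equal_comparar_lista_ips := by
  intro ips _hdom hpre
  unfold Spec_comparar_lista_ips
  match ips with
  | [] => rfl
  | [ip] =>
    simp only [comparar_lista_ips, comparar_lista_ips_alt, List.foldl_nil]
    rw [pvTorneo]; rfl
  | first :: next :: rest' =>
    obtain ⟨hparse, hlen⟩ := hpre.resolve_left (by simp)
    set rest := next :: rest' with hrest_def
    have hinv := pvFold_inv rest first
      (hparse first (List.mem_cons_self ..))
      (fun ip hip => ⟨hparse ip (List.mem_cons_of_mem _ hip),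
        hlen ip (List.mem_cons_of_mem _ hip) first (List.mem_cons_self ..)⟩)
    have htf : rest.foldl pvStepB (some first) = some (pvTorneo (first :: rest)) := by
      have h := torneo_fold (first :: rest) (by simp)
      simpa [List.foldl_cons, pvStepB] using h
    simp only [comparar_lista_ips, comparar_lista_ips_alt]
    rw [hinv, htf]
    rfl
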